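-- pv_equiv track=rewrite | github.com/BJV-git/leetcode | math/perfect_no.py | perf_no
-- ===== SOURCE A (Python) =====
-- def perf_no(n):
--
--     i = 2
--     t = 0
--     while t < n:
--
--         t = (2**(i-1)) * ((2**i)-1)
--         if t == n:
--             return True
--         i+=1
--     return False
-- ===== SOURCE B (Python) =====
-- def _odd_split(m):
--     # split a positive integer into (odd part, exponent of 2)
--     if m % 2 == 0:
--         m2, e = _odd_split(m >> 1)
--         return m2, e + 1
--     return m, 0
--
--
-- def perf_no(n):
--     # n is of Euclid form 2**(i-1) * (2**i - 1), i >= 2, iff its odd part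
--     # is exactly 2**(e+1) - 1 where e >= 1 is its power-of-two exponent.
--     if n <= 0:
--         return False
--     m, e = _odd_split(n)
--     return e >= 1 and m == (1 << (e + 1)) - 1
-- ===== Notes on version B (the rewrite author's own statement) =====
-- stated objective: alternative
-- what changed: B replaces A's generate-Euclid-candidates-and-compare loop by a direct factorization: it splits n into its odd part and power-of-two exponent and checks that the odd part is the Mersenne number matching that exponent.
import Mathlib
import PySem

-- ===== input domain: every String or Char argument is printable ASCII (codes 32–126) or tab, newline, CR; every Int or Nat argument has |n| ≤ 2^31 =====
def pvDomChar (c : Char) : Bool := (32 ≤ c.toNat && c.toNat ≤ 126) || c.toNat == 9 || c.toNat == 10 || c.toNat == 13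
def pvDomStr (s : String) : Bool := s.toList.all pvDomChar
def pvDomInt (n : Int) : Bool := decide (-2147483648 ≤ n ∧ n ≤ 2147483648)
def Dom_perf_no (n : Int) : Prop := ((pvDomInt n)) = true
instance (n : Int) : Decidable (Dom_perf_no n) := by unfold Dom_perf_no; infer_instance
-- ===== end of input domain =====

-- B checks the Euclid form 2^(i-1)*(2^i-1) by factoring out the power of two instead of
-- A's loop generating candidates; alternative algorithm, return values proved equal for all n.

-- ===== PORT A =====
-- candidate value computed in A's loop body: t = (2**(i-1)) * ((2**i)-1)
def pvCand (i : Nat) : Int := (2 : Int) ^ (i - 1) * ((2 : Int) ^ i - 1)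

-- A's while loop; fuel only makes the recursion total (the loop always exits well before
-- t has been < n for n.toNat + 2 iterations, since candidates grow at least by 1).
def perfLoopA (fuel : Nat) (n : Int) (i : Nat) (t : Int) : Bool :=
  match fuel with
  | 0 => false
  | f + 1 =>
    if t < n then
      if pvCand i = n then true
      else perfLoopA f n (i + 1) (pvCand i)
    else false

def perf_no (n : Int) : Bool := perfLoopA (n.toNat + 2) n 2 0

-- ===== PORT B =====
-- _odd_split: recursive split of a positive integer into (odd part, exponent of 2).
-- The guard 0 < m only makes the recursion total; B reaches it with m > 0 always.
-- Int./ agrees with Python's >> 1 for m > 0.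
def pvOddSplit (m : Int) : Int × Nat :=
  if h : 0 < m ∧ m % 2 = 0 then
    ((pvOddSplit (m / 2)).1, (pvOddSplit (m / 2)).2 + 1)
  else (m, 0)
termination_by m.toNat
decreasing_by
  omega

def perf_no_alt (n : Int) : Bool :=
  if n ≤ 0 then false
  else
    decide (1 ≤ (pvOddSplit n).2) &&
      decide ((pvOddSplit n).1 = (2 : Int) ^ ((pvOddSplit n).2 + 1) - 1)

-- ===== PRECONDITION & SPEC =====
def Spec_perf_no (n : Int) (out : Bool) : Prop := out = perf_no_alt n
instance (n : Int) (out : Bool) : Decidable (Spec_perf_no n out) := by unfold Spec_perf_no; infer_instance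

-- ===== CLAIM (what is proved, stated in full; the proofs are below) =====
def Claim_equal_perf_no : Prop := ∀ (n : Int), Dom_perf_no n → Spec_perf_no n (perf_no n)

-- ===== LEMMAS AND PROOFS =====

theorem pvCand_pos (i : Nat) (hi : 1 ≤ i) : 0 < pvCand i := by
  unfold pvCand
  have h1 : (0:Int) < 2 ^ (i-1) := by positivity
  have h2 : (1:Int) < 2 ^ i := by
    have : (2:Int)^1 ≤ 2^i := pow_le_pow_right₀ (by norm_num) hi
    simpa using lt_of_lt_of_le (by norm_num) this
  nlinarith

theorem pvCand_lt_succ (i : Nat) (hi : 2 ≤ i) : pvCand i < pvCand (i + 1) := by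
  unfold pvCand
  have hi1 : i - 1 + 1 = i := by omega
  have h2 : (1:Int) < 2 ^ i := by
    have : (2:Int)^1 ≤ 2^i := pow_le_pow_right₀ (by norm_num) (by omega)
    simpa using lt_of_lt_of_le (by norm_num) this
  have e1 : (2:Int) ^ i = 2 ^ (i-1) * 2 := by
    rw [← pow_succ, hi1]
  have e2 : (2:Int) ^ (i+1) = 2 ^ i * 2 := by rw [pow_succ]
  have e3 : (i + 1) - 1 = i := by omega
  rw [e3, e2, e1]
  nlinarith

theorem pvCand_strict (i j : Nat) (hi : 2 ≤ i) (hij : i < j) : pvCand i < pvCand j := by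
  induction j with
  | zero => omega
  | succ k ih =>
    rcases Nat.lt_or_ge i k with h | h
    · exact lt_trans (ih h) (pvCand_lt_succ k (by omega))
    · have : i = k := by omega
      subst this
      exact pvCand_lt_succ i hi

theorem pvCand_ge_self (j : Nat) (hj : 2 ≤ j) : (j : Int) ≤ pvCand j := by
  unfold pvCand
  have h1 : (j:Int) ≤ 2 ^ (j-1) := by
    have : j - 1 < 2 ^ (j-1) := Nat.lt_two_pow_self
    have hj' : j ≤ 2 ^ (j - 1) := by omega
    exact_mod_cast hj'
  have h2 : (1:Int) ≤ 2 ^ j - 1 := by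
    have : (2:Int)^1 ≤ 2^j := pow_le_pow_right₀ (by norm_num) (by omega)
    simp at this; omega
  have h3 : (0:Int) < 2 ^ (j-1) := by positivity
  nlinarith

-- soundness of A's loop: true result exhibits a candidate index
theorem loopA_sound (fuel : Nat) :
    ∀ (n : Int) (i : Nat) (t : Int), perfLoopA fuel n i t = true →
      ∃ j, i ≤ j ∧ pvCand j = n := by
  induction fuel with
  | zero => intro n i t h; simp [perfLoopA] at h
  | succ f ih =>
    intro n i t h
    unfold perfLoopA at h
    split at h
    · split at h
      · exact ⟨i, le_refl i, by assumption⟩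
      · obtain ⟨j, hj1, hj2⟩ := ih n (i + 1) (pvCand i) h
        exact ⟨j, by omega, hj2⟩
    · simp at h

-- completeness of A's loop: enough fuel and an existing candidate yield true
theorem loopA_complete (fuel : Nat) :
    ∀ (n : Int) (i j : Nat) (t : Int), 2 ≤ i → i ≤ j → pvCand j = n → t < n →
      j + 1 ≤ i + fuel → perfLoopA fuel n i t = true := by
  induction fuel with
  | zero => intro n i j t h2 hij hc ht hf; omega
  | succ f ih =>
    intro n i j t h2 hij hc ht hf
    unfold perfLoopA
    rw [if_pos ht]
    by_cases he : pvCand i = n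
    · simp [he]
    · rw [if_neg he]
      have hij' : i < j := by
        rcases Nat.eq_or_lt_of_le hij with h | h
        · exact absurd (h ▸ hc) he
        · exact h
      have hlt : pvCand i < n := hc ▸ pvCand_strict i j h2 hij'
      exact ih n (i + 1) j (pvCand i) (by omega) (by omega) hc hlt (by omega)

theorem perf_no_iff (n : Int) : perf_no n = true ↔ ∃ j, 2 ≤ j ∧ pvCand j = n := by
  constructor
  · intro h
    obtain ⟨j, hj1, hj2⟩ := loopA_sound _ n 2 0 h
    exact ⟨j, hj1, hj2⟩
  · rintro ⟨j, hj1, hj2⟩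
    have hn : (j : Int) ≤ n := hj2 ▸ pvCand_ge_self j hj1
    have hn0 : (0:Int) < n := by
      have : (2:Int) ≤ j := by exact_mod_cast hj1
      omega
    have hjt : j ≤ n.toNat := by
      have : (j : Int) ≤ (n.toNat : Int) := by omega
      exact_mod_cast this
    exact loopA_complete (n.toNat + 2) n 2 j 0 (le_refl 2) hj1 hj2 hn0 (by omega)

-- specification of _odd_split on positive inputs
theorem pvOddSplit_spec (m : Int) (hm : 0 < m) :
    0 < (pvOddSplit m).1 ∧ (pvOddSplit m).1 % 2 = 1 ∧
      (2 : Int) ^ (pvOddSplit m).2 * (pvOddSplit m).1 = m := by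
  induction m using pvOddSplit.induct with
  | case1 m h ih =>
    have hm0 := h.1
    have hme := h.2
    have hhalf : 0 < m / 2 := by omega
    obtain ⟨h1, h2, h3⟩ := ih hhalf
    rw [pvOddSplit, dif_pos h]
    refine ⟨h1, h2, ?_⟩
    show (2:Int) ^ ((pvOddSplit (m/2)).2 + 1) * (pvOddSplit (m/2)).1 = m
    rw [pow_succ]
    have hm2 : m = 2 * (m / 2) := by omega
    linear_combination 2 * h3 - hm2
  | case2 m h =>
    rw [pvOddSplit, dif_neg h]
    have hodd : m % 2 = 1 := by
      by_cases he : m % 2 = 0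
      · exact absurd ⟨hm, he⟩ h
      · omega
    exact ⟨hm, hodd, by simp⟩

-- uniqueness of the odd-part factorization
theorem two_pow_odd_unique (a : Nat) :
    ∀ (b : Nat) (x y : Int), x % 2 = 1 → y % 2 = 1 →
      (2 : Int) ^ a * x = (2 : Int) ^ b * y → a = b ∧ x = y := by
  induction a with
  | zero =>
    intro b x y hx hy h
    cases b with
    | zero => exact ⟨rfl, by simpa using h⟩
    | succ b' =>
      exfalso
      have hx2 : x = 2 * ((2:Int) ^ b' * y) := by linear_combination h
      omega
  | succ a' ih =>
    intro b x y hx hy h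
    cases b with
    | zero =>
      exfalso
      have hy2 : y = 2 * ((2:Int) ^ a' * x) := by linear_combination -h
      omega
    | succ b' =>
      have h' : (2:Int) ^ a' * x = 2 ^ b' * y := by
        have h2 : (2:Int) * ((2:Int) ^ a' * x) = 2 * ((2:Int) ^ b' * y) := by
          linear_combination h
        exact mul_left_cancel₀ (by norm_num) h2
      obtain ⟨hab, hxy⟩ := ih b' x y hx hy h'
      exact ⟨by omega, hxy⟩

theorem perf_no_alt_iff (n : Int) : perf_no_alt n = true ↔ ∃ j, 2 ≤ j ∧ pvCand j = n := by
  unfold perf_no_alt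
  by_cases hn : n ≤ 0
  · rw [if_pos hn]
    simp only [Bool.false_eq_true, false_iff]
    rintro ⟨j, hj1, hj2⟩
    have := pvCand_pos j (by omega)
    omega
  · rw [if_neg hn]
    rw [not_le] at hn
    obtain ⟨h1, h2, h3⟩ := pvOddSplit_spec n hn
    simp only [Bool.and_eq_true, decide_eq_true_eq]
    constructor
    · rintro ⟨he, hm⟩
      refine ⟨(pvOddSplit n).2 + 1, by omega, ?_⟩
      unfold pvCand
      simp only [Nat.add_sub_cancel]
      rw [← hm]
      exact h3
    · rintro ⟨j, hj1, hj2⟩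
      have hodd : ((2:Int) ^ j - 1) % 2 = 1 := by
        have hj : j - 1 + 1 = j := by omega
        have e : (2:Int) ^ j = 2 ^ (j - 1) * 2 := by rw [← pow_succ, hj]
        have hp : (0:Int) < 2 ^ (j - 1) := by positivity
        omega
      have hfact : (2:Int) ^ (j - 1) * (2 ^ j - 1) = 2 ^ (pvOddSplit n).2 * (pvOddSplit n).1 := by
        rw [h3, ← hj2]; rfl
      obtain ⟨hab, hxy⟩ := two_pow_odd_unique (j - 1) (pvOddSplit n).2
        ((2:Int) ^ j - 1) (pvOddSplit n).1 hodd h2 hfact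
      constructor
      · omega
      · rw [← hxy]
        have hje : (pvOddSplit n).2 + 1 = j := by omega
        rw [hje]

-- ===== VERDICT (by name: the statement is the Claim_ definition above) =====
theorem perf_no_spec : Claim_equal_perf_no := by
  intro n _
  unfold Spec_perf_no
  rw [Bool.eq_iff_iff, perf_no_iff, perf_no_alt_iff]
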